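-- pv_equiv track=rewrite | github.com/yaeeun916/RP-Lab-DL-School-HW | HW1/subsequences.py | subsequences3
-- ===== SOURCE A (Python) =====
-- def subsequences3(iterable):
--     itList=list(iterable)
--     sub=()
--     for i in range(len(itList)):
--         for j in range(i+1, len(itList)):
--             for k in range(j+1, len(itList)):
--                 sub=sub+(str(itList[i])+str(itList[j])+str(itList[k]),)
--     return sub
-- ===== SOURCE B (Python) =====
-- def subsequences3(iterable):
--     strs = [str(x) for x in iterable]
--
--     def combos(k, xs):
--         if k == 0:
--             return ['']
--         if len(xs) < k:
--             return []
--         return [xs[0] + t for t in combos(k - 1, xs[1:])] + combos(k, xs[1:])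
--
--     return tuple(combos(3, strs))
-- ===== Notes on version B (the rewrite author's own statement) =====
-- stated objective: alternative
-- what changed: Replaced the three fixed nested index loops accumulating into a tuple by a general recursive k-combination builder combos(k, xs) that either prefixes the head element to each (k-1)-combination of the tail or skips it, building lists and emitting the same lexicographic order.
import Mathlib
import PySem

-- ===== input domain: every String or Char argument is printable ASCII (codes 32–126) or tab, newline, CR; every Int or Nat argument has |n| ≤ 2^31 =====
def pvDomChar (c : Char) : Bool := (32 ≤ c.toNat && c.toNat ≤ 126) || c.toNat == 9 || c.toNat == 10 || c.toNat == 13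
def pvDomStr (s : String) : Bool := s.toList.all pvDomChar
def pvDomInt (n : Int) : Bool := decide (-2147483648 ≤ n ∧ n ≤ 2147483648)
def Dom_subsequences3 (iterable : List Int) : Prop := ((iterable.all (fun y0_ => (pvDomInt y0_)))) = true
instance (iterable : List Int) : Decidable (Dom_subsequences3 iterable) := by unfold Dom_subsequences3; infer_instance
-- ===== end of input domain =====

-- B replaces A's three fixed nested index loops by a general recursive k-combination
-- builder over the string list (alternative decomposition; same output order).

-- ===== PORT A =====
-- literal transliteration of A's triple nested index loop, tuple accumulation as list append
def subsequences3 (iterable : List Int) : List String :=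
  let itList := iterable
  (PySem.List.pyRange 0 (PySem.List.len itList)).foldl (fun sub i =>
    (PySem.List.pyRange (i + 1) (PySem.List.len itList)).foldl (fun sub j =>
      (PySem.List.pyRange (j + 1) (PySem.List.len itList)).foldl (fun sub k =>
        sub ++ [PySem.Int.toStr (PySem.List.pyGetD itList i 0) ++
                PySem.Int.toStr (PySem.List.pyGetD itList j 0) ++
                PySem.Int.toStr (PySem.List.pyGetD itList k 0)]) sub) sub) []

-- ===== PORT B =====
-- Source B's recursive helper combos(k, xs): k = 0 → [''], too short → [], else
-- combinations containing xs[0] (prefix xs[0]) then those avoiding it.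
def pyCombos : Nat → List String → List String
  | 0, _ => [""]
  | _ + 1, [] => []
  | k + 1, x :: rest =>
    if (x :: rest).length < k + 1 then []
    else (pyCombos k rest).map (fun t => x ++ t) ++ pyCombos (k + 1) rest

def subsequences3_alt (iterable : List Int) : List String :=
  pyCombos 3 (iterable.map (fun x => PySem.Int.toStr x))

-- ===== PRECONDITION & SPEC =====
def Spec_subsequences3 (iterable : List Int) (out : List String) : Prop := out = subsequences3_alt iterable
instance (iterable : List Int) (out : List String) : Decidable (Spec_subsequences3 iterable out) := by unfold Spec_subsequences3; infer_instance

-- ===== CLAIM (what is proved, stated in full; the proofs are below) =====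
def Claim_equal_subsequences3 : Prop := ∀ (iterable : List Int), Dom_subsequences3 iterable → Spec_subsequences3 iterable (subsequences3 iterable)

-- ===== LEMMAS AND PROOFS =====

-- "for each element x with suffix r after it, emit H x r" — the shape shared by
-- A's suffix index ranges and B's recursion.
def sufRec {α β : Type} (H : α → List α → List β) : List α → List β
  | [] => []
  | x :: r => H x r ++ sufRec H r

-- an index loop j ∈ [a, len ss) whose body depends on ss[j] and the suffix after j is sufRec on drop a
theorem sufRec_eq_flatMap {α β : Type} (H : α → List α → List β) (d : α) (ss : List α) :
    ∀ (m a : Nat), a + m = ss.length →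
      (PySem.List.pyRange (↑a) (↑ss.length)).flatMap
        (fun j => H (PySem.List.pyGetD ss j d) (ss.drop (j + 1).toNat))
      = sufRec H (ss.drop a) := by
  intro m
  induction m with
  | zero =>
    intro a ha
    rw [PySem.List.pyRange_one_eq_nil (by omega), List.drop_of_length_le (by omega)]
    rfl
  | succ m ih =>
    intro a ha
    have hlt : (a : Int) < (ss.length : Int) := by exact_mod_cast (by omega : a < ss.length)
    rw [PySem.List.pyRange_one_cons hlt, List.flatMap_cons]
    have hcast : ((a : Int) + 1) = ((a + 1 : Nat) : Int) := by push_cast; ring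
    have hdrop : ss.drop a = ss.getD a d :: ss.drop (a + 1) := by
      rw [List.getD_eq_getElem?_getD, List.getElem?_eq_getElem (by omega), Option.getD_some]
      exact List.drop_eq_getElem_cons (by omega)
    rw [hcast, ih (a + 1) (by omega), PySem.List.pyGetD_natCast,
        show ((a + 1 : Nat) : Int).toNat = a + 1 by omega, hdrop]
    rfl

theorem sufRec_map {α β γ : Type} (H : α → List α → List β) (g : β → γ) (l : List α) :
    (sufRec H l).map g = sufRec (fun x r => (H x r).map g) l := by
  induction l with
  | nil => rfl
  | cons x r ih => simp [sufRec, ih]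

theorem pyCombos_one (xs : List String) : pyCombos 1 xs = xs := by
  induction xs with
  | nil => rfl
  | cons x r ih =>
    simp [pyCombos, ih, String.append_empty]

theorem sufRec_pair_short {γ : Type} (g : String → String → γ) (r : List String)
    (h : r.length ≤ 1) : sufRec (fun y r2 => r2.map (g y)) r = [] := by
  match r, h with
  | [], _ => rfl
  | [y], _ => rfl

theorem pyCombos_two (xs : List String) :
    pyCombos 2 xs = sufRec (fun y r2 => r2.map (fun t => y ++ t)) xs := by
  induction xs with
  | nil => rfl
  | cons x r ih =>
    by_cases h : (x :: r).length < 2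
    · have hr : r = [] := by
        simp only [List.length_cons] at h
        exact List.eq_nil_of_length_eq_zero (by omega)
      subst hr
      simp [pyCombos, sufRec]
    · show (if (x :: r).length < 2 then []
        else (pyCombos 1 r).map (fun t => x ++ t) ++ pyCombos 2 r) = _
      rw [if_neg h, pyCombos_one, ih]
      rfl

theorem sufRec_pair_nested_short (r : List String)
    (h : r.length ≤ 2) :
    sufRec (fun x r1 => sufRec (fun y r2 => r2.map (fun t => x ++ y ++ t)) r1) r = [] := by
  match r, h with
  | [], _ => rfl
  | [x], _ => show sufRec _ [] ++ _ = _; rfl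
  | [x, y], _ =>
    show (sufRec (fun y r2 => r2.map (fun t => x ++ y ++ t)) [y] ++
          sufRec (fun x r1 => sufRec (fun y r2 => r2.map (fun t => x ++ y ++ t)) r1) [y]) = []
    rw [sufRec_pair_short _ _ (by simp)]
    rfl

theorem pyCombos_three (xs : List String) :
    pyCombos 3 xs
      = sufRec (fun x r => sufRec (fun y r2 => r2.map (fun t => x ++ y ++ t)) r) xs := by
  induction xs with
  | nil => rfl
  | cons x r ih =>
    show (if (x :: r).length < 3 then []
      else (pyCombos 2 r).map (fun t => x ++ t) ++ pyCombos 3 r) = _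
    by_cases h : (x :: r).length < 3
    · rw [if_pos h]
      show [] = sufRec (fun y r2 => r2.map (fun t => x ++ y ++ t)) r ++
            sufRec (fun x r1 => sufRec (fun y r2 => r2.map (fun t => x ++ y ++ t)) r1) r
      rw [sufRec_pair_short _ _ (by simp at h ⊢; omega),
          sufRec_pair_nested_short _ (by simp at h ⊢; omega)]
      rfl
    · rw [if_neg h, pyCombos_two, ih, sufRec_map]
      show _ ++ _ = _ ++ _
      congr 1
      apply congrFun
      apply congrArg
      funext y r2
      rw [List.map_map]
      apply List.map_congr_left
      intro t _
      simp [String.append_assoc]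

-- the triple nested index loop over [0,n) with element accessor g equals the recursive
-- combination builder on the materialised list of strings
theorem key_loop (g : Int → String) (n : Nat) :
    (PySem.List.pyRange 0 (n : Int)).foldl (fun sub i =>
      (PySem.List.pyRange (i + 1) (n : Int)).foldl (fun sub j =>
        (PySem.List.pyRange (j + 1) (n : Int)).foldl (fun sub k =>
          sub ++ [g i ++ g j ++ g k]) sub) sub) []
    = pyCombos 3 ((PySem.List.pyRange 0 (n : Int)).map g) := by
  have hget : ∀ t : Int, 0 ≤ t → t < (n : Int) →
      PySem.List.pyGetD ((PySem.List.pyRange 0 (n : Int)).map g) t "" = g t := by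
    intro t h0 hn
    exact PySem.List.pyGetD_map_pyRange_of_nonneg g _ t "" h0 hn
  have hlen : ((PySem.List.pyRange 0 (n : Int)).map g).length = n := by
    simp [PySem.List.length_pyRange_one]
  have hdrop : ∀ a : Int, 0 ≤ a →
      (PySem.List.pyRange a (n : Int)).map g
        = ((PySem.List.pyRange 0 (n : Int)).map g).drop a.toNat := by
    intro a ha
    rw [← PySem.List.map_pyGetD_pyRange' ((PySem.List.pyRange 0 (n : Int)).map g) "" ha, hlen]
    apply List.map_congr_left
    intro t ht
    rw [PySem.List.mem_pyRange_one] at ht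
    exact (hget t (by omega) ht.2).symm
  -- 1. collapse the three folds into flatMap/flatMap/map
  have L1 : (PySem.List.pyRange 0 (n : Int)).foldl (fun sub i =>
      (PySem.List.pyRange (i + 1) (n : Int)).foldl (fun sub j =>
        (PySem.List.pyRange (j + 1) (n : Int)).foldl (fun sub k =>
          sub ++ [g i ++ g j ++ g k]) sub) sub) []
      = (PySem.List.pyRange 0 (n : Int)).flatMap (fun i =>
          (PySem.List.pyRange (i + 1) (n : Int)).flatMap (fun j =>
            (PySem.List.pyRange (j + 1) (n : Int)).map (fun k => g i ++ g j ++ g k))) := by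
    rw [PySem.List.foldl_congr_mem _ _
        (fun sub i => sub ++ (PySem.List.pyRange (i + 1) (n : Int)).flatMap (fun j =>
            (PySem.List.pyRange (j + 1) (n : Int)).map (fun k => g i ++ g j ++ g k))) _
        (by
          intro acc i _
          rw [PySem.List.foldl_congr_mem _ _
              (fun sub j => sub ++ (PySem.List.pyRange (j + 1) (n : Int)).map
                  (fun k => g i ++ g j ++ g k)) _
              (by
                intro acc2 j _
                rw [PySem.List.foldl_append_singleton_eq_map]),
            PySem.List.foldl_append_eq_flatMap])]
    rw [PySem.List.foldl_append_eq_flatMap, List.nil_append]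
  rw [L1]
  -- 2. turn index accesses into suffix recursions, innermost outwards
  have L2 : (PySem.List.pyRange 0 (n : Int)).flatMap (fun i =>
      (PySem.List.pyRange (i + 1) (n : Int)).flatMap (fun j =>
        (PySem.List.pyRange (j + 1) (n : Int)).map (fun k => g i ++ g j ++ g k)))
      = (PySem.List.pyRange 0 (n : Int)).flatMap (fun i =>
          (fun x r => sufRec (fun y r2 => r2.map (fun t => x ++ y ++ t)) r)
            (PySem.List.pyGetD ((PySem.List.pyRange 0 (n : Int)).map g) i "")
            (((PySem.List.pyRange 0 (n : Int)).map g).drop (i + 1).toNat)) := by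
    apply List.flatMap_congr
    intro i hi
    rw [PySem.List.mem_pyRange_one] at hi
    have hi0 : (0:Int) ≤ i := hi.1
    have hin : i < (n : Int) := hi.2
    have inner : ∀ j : Int, j ∈ PySem.List.pyRange (i + 1) (n : Int) →
        (PySem.List.pyRange (j + 1) (n : Int)).map (fun k => g i ++ g j ++ g k)
        = (fun y r2 => r2.map (fun t =>
            PySem.List.pyGetD ((PySem.List.pyRange 0 (n : Int)).map g) i "" ++ y ++ t))
            (PySem.List.pyGetD ((PySem.List.pyRange 0 (n : Int)).map g) j "")
            (((PySem.List.pyRange 0 (n : Int)).map g).drop (j + 1).toNat) := by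
      intro j hj
      rw [PySem.List.mem_pyRange_one] at hj
      have hj0 : (0:Int) ≤ j := by omega
      have hjn : j < (n : Int) := hj.2
      show _ = (((PySem.List.pyRange 0 (n : Int)).map g).drop (j + 1).toNat).map _
      rw [← hdrop (j + 1) (by omega), List.map_map, hget i hi0 hin, hget j hj0 hjn]
      rfl
    rw [List.flatMap_congr inner]
    show _ = sufRec _ _
    have := sufRec_eq_flatMap
      (fun y r2 => r2.map (fun t =>
          PySem.List.pyGetD ((PySem.List.pyRange 0 (n : Int)).map g) i "" ++ y ++ t))
      "" ((PySem.List.pyRange 0 (n : Int)).map g)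
      (n - (i + 1).toNat) (i + 1).toNat (by omega)
    rw [hlen] at this
    rw [show ((i + 1).toNat : Int) = i + 1 by omega] at this
    exact this
  rw [L2]
  have L3 := sufRec_eq_flatMap
    (fun x r => sufRec (fun y r2 => r2.map (fun t => x ++ y ++ t)) r)
    "" ((PySem.List.pyRange 0 (n : Int)).map g) n 0 (by omega)
  rw [hlen] at L3
  rw [show ((0 : Nat) : Int) = 0 from rfl] at L3
  rw [L3, List.drop_zero, pyCombos_three]

-- ===== VERDICT (by name: the statement is the Claim_ definition above) =====
theorem subsequences3_spec : Claim_equal_subsequences3 := by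
  intro iterable _
  show subsequences3 iterable = subsequences3_alt iterable
  have hA : subsequences3 iterable
      = (PySem.List.pyRange 0 (iterable.length : Int)).foldl (fun sub i =>
          (PySem.List.pyRange (i + 1) (iterable.length : Int)).foldl (fun sub j =>
            (PySem.List.pyRange (j + 1) (iterable.length : Int)).foldl (fun sub k =>
              sub ++ [(fun t => PySem.Int.toStr (PySem.List.pyGetD iterable t 0)) i ++
                      (fun t => PySem.Int.toStr (PySem.List.pyGetD iterable t 0)) j ++
                      (fun t => PySem.Int.toStr (PySem.List.pyGetD iterable t 0)) k]) sub) sub) [] := rfl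
  rw [hA, key_loop (fun t => PySem.Int.toStr (PySem.List.pyGetD iterable t 0)) iterable.length]
  show pyCombos 3 _ = pyCombos 3 _
  congr 1
  have : (PySem.List.pyRange 0 (iterable.length : Int)).map
      (fun t => PySem.Int.toStr (PySem.List.pyGetD iterable t 0))
      = ((PySem.List.pyRange 0 (iterable.length : Int)).map
          (fun t => PySem.List.pyGetD iterable t 0)).map PySem.Int.toStr := by
    rw [List.map_map]; rfl
  rw [this]
  congr 1
  exact PySem.List.map_pyGetD_pyRange_zero' iterable 0
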